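-- pv_equiv track=rewrite | github.com/dislovemartin/ACGS | src/backend/gs_service/app/core/llm_reliability_framework.py | _apply_moderate_mitigation
-- ===== SOURCE A (Python) =====
-- def _apply_moderate_mitigation(text: str) -> str:
--     """Apply moderate bias mitigation for medium-bias content."""
--     mitigations = {
--         "normal users": "authorized users",
--         "standard users": "users",
--         "regular users": "users",
--         "typical users": "users"
--     }
--
--     mitigated = text
--     for biased_term, neutral_term in mitigations.items():
--         mitigated = mitigated.replace(biased_term, neutral_term)
--
--     return mitigated
-- ===== SOURCE B (Python) =====
-- def _apply_moderate_mitigation(text: str) -> str: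
--     """Apply moderate bias mitigation for medium-bias content."""
--     # Single left-to-right pass: a dispatch table keyed by the (distinct) first
--     # characters of the four biased phrases; at each position the one candidate
--     # phrase is checked, its replacement emitted and the match skipped.
--     dispatch = {
--         "n": ("normal users", "authorized users"),
--         "s": ("standard users", "users"),
--         "r": ("regular users", "users"),
--         "t": ("typical users", "users"),
--     }
--     out = []
--     i = 0
--     n = len(text)
--     while i < n:
--         rule = dispatch.get(text[i])
--         if rule is not None and text.startswith(rule[0], i):
--             out.append(rule[1])
--             i += len(rule[0])
--         else:
--             out.append(text[i])
--             i += 1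
--     return "".join(out)
-- ===== Notes on version B (the rewrite author's own statement) =====
-- stated objective: alternative
-- what changed: Replaces A's four sequential full-text str.replace passes by ONE left-to-right pass over the text with a first-character dispatch table (at most one candidate phrase per position), so the text is traversed once instead of four times and replacements are never rescanned; Pre_ excludes texts containing one of six substrings where the four biased phrases overlap or where an earlier replacement creates a new biased phrase, on which A's pass-cascading result and B's single-pass result are both defensible readings of an unspecified corner.
-- outside the precondition, e.g. on _apply_moderate_mitigation('regular userstandard users'): A returns 'regular userusers', B returns 'userstandard users'; on _apply_moderate_mitigation('typical userstandard users'): A returns 'typical userusers', B returns 'userstandard users'; on _apply_moderate_mitigation('regular standard users'): A returns 'users', B returns 'regular users'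
import Mathlib
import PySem

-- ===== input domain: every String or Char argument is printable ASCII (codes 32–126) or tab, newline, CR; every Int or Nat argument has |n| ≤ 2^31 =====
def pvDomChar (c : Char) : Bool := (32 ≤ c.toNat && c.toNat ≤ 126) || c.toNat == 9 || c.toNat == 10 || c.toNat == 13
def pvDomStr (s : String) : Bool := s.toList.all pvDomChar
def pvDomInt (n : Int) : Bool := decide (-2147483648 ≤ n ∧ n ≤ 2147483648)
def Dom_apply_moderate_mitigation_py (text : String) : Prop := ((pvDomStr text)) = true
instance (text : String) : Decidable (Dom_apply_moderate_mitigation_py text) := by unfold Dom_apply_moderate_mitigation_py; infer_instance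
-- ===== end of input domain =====

-- B replaces A's four sequential full-text replace passes by ONE left-to-right pass with a
-- first-character dispatch table (objective: alternative); Pre_ excludes texts containing one of six
-- substrings where biased phrases overlap or a replacement creates a new biased phrase — there A's
-- pass-cascading value and B's single-pass value are both defensible readings of an unspecified corner.


-- ===== PORT A =====
-- literal port of A: a dict of four rules, folded over with str.replace (four sequential passes)
def apply_moderate_mitigation_py (text : String) : String :=
  let mitigations : PySem.Dict String String :=
    ((((PySem.Dict.empty.insert "normal users" "authorized users").insert
        "standard users" "users").insert
        "regular users" "users").insert
        "typical users" "users")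
  mitigations.items.foldl (fun mitigated p => PySem.Str.replace mitigated p.1 p.2) text

-- ===== PORT B =====
-- B's dispatch table keyed by the (distinct) first characters of the four biased phrases
def pvDispatch (c : Char) : Option (List Char × List Char) :=
  if c = 'n' then some ("normal users".toList, "authorized users".toList)
  else if c = 's' then some ("standard users".toList, "users".toList)
  else if c = 'r' then some ("regular users".toList, "users".toList)
  else if c = 't' then some ("typical users".toList, "users".toList)
  else none

-- B's single left-to-right pass: at each position look up the one candidate phrase by first
-- character; on a match emit its replacement and skip the phrase, else copy the character
def pvOnePass : List Char → List Char
  | [] => []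
  | c :: t =>
    match pvDispatch c with
    | some (p, r) =>
      if p.isPrefixOf (c :: t) then r ++ pvOnePass (t.drop (p.length - 1))
      else c :: pvOnePass t
    | none => c :: pvOnePass t
  termination_by l => l.length
  decreasing_by
  · simp only [List.length_cons, List.length_drop]; omega
  · simp

def apply_moderate_mitigation_py_alt (text : String) : String :=
  String.ofList (pvOnePass text.toList)

-- ===== PRECONDITION & SPEC =====
-- the six substrings on which A's four sequential passes and B's single pass diverge:
-- three phrase overlaps at a shared 's' and three cascades where an earlier replacement
-- creates a new biased phrase that a later pass of A then also replaces
def pvBads : List (List Char) :=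
  ["normal userstandard users".toList, "regular userstandard users".toList,
   "typical userstandard users".toList, "regular standard users".toList,
   "typical standard users".toList, "typical regular users".toList]

-- Pre_ excludes texts containing one of the six overlap/cascade substrings, on which A's
-- cascading value is an accident of its pass order and B's single-pass value is equally defensible.
def Pre_apply_moderate_mitigation_py (text : String) : Prop :=
  ∀ b ∈ pvBads, ¬ (b <:+: text.toList)
instance (text : String) : Decidable (Pre_apply_moderate_mitigation_py text) := by
  unfold Pre_apply_moderate_mitigation_py; infer_instance

def pvWitness_apply_moderate_mitigation_py : String := "all normal users and regular users"

def Spec_apply_moderate_mitigation_py (text : String) (out : String) : Prop := out = apply_moderate_mitigation_py_alt text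
instance (text : String) (out : String) : Decidable (Spec_apply_moderate_mitigation_py text out) := by unfold Spec_apply_moderate_mitigation_py; infer_instance

-- ===== CLAIM (what is proved, stated in full; the proofs are below) =====
def Claim_equal_apply_moderate_mitigation_py : Prop := ∀ (text : String), Dom_apply_moderate_mitigation_py text → Pre_apply_moderate_mitigation_py text → Spec_apply_moderate_mitigation_py text (apply_moderate_mitigation_py text)

-- ===== LEMMAS AND PROOFS =====

-- the phrases, replacements, and the fragments the proofs track, as plain char lists
def pvP1 : List Char := "normal users".toList
def pvP2 : List Char := "standard users".toList
def pvP3 : List Char := "regular users".toList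
def pvP4 : List Char := "typical users".toList
def pvR1 : List Char := "authorized users".toList
def pvR2 : List Char := "users".toList
def pvT : List Char := "tandard users".toList
def pvW3 : List Char := "regular ".toList
def pvW4 : List Char := "typical ".toList
def pvW43 : List Char := "typical regular ".toList

-- one str.replace pass as an explicit left-to-right scanner
def pvScanChars (old new : List Char) : List Char → List Char
  | [] => []
  | c :: t =>
    if old.isPrefixOf (c :: t) then new ++ pvScanChars old new (t.drop (old.length - 1))
    else c :: pvScanChars old new t
  termination_by l => l.length
  decreasing_by
  · simp only [List.length_cons, List.length_drop]; omega
  · simp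

-- PySem's replace worker equals the scanner, given enough fuel and a nonempty pattern.
theorem pvGo_eq_scan (old new : List Char) (hne : old ≠ []) :
    ∀ (fuel : Nat) (l acc : List Char), l.length ≤ fuel →
      PySem.Chars.replace.go old new fuel l acc = acc.reverse ++ pvScanChars old new l := by
  intro fuel
  induction fuel with
  | zero =>
    intro l acc hl
    have : l = [] := List.eq_nil_of_length_eq_zero (Nat.le_zero.mp hl)
    subst this
    simp [PySem.Chars.replace.go, pvScanChars]
  | succ fuel ih =>
    intro l acc hl
    cases l with
    | nil => simp [PySem.Chars.replace.go, pvScanChars]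
    | cons c t =>
      by_cases hp : old.isPrefixOf (c :: t)
      · have hold : 1 ≤ old.length := by
          cases old with
          | nil => exact absurd rfl hne
          | cons _ _ => simp
        have hdrop : List.drop old.length (c :: t) = t.drop (old.length - 1) := by
          have h1 : old.length = (old.length - 1) + 1 := by omega
          conv_lhs => rw [h1]
          exact List.drop_succ_cons
        have hlen : (t.drop (old.length - 1)).length ≤ fuel := by
          simp only [List.length_drop]
          simp only [List.length_cons] at hl
          omega
        simp only [PySem.Chars.replace.go, hp, if_true]
        rw [hdrop, ih _ _ hlen]
        simp [pvScanChars, hp]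
      · have hlen : t.length ≤ fuel := by
          simp only [List.length_cons] at hl; omega
        simp only [PySem.Chars.replace.go, hp]
        rw [ih _ _ hlen]
        simp [pvScanChars, hp]

theorem pvReplace_eq_scan (s old new : List Char) (hne : old ≠ []) :
    PySem.Chars.replace s old new = pvScanChars old new s := by
  unfold PySem.Chars.replace
  rw [if_neg (by simpa using hne)]
  simpa using pvGo_eq_scan old new hne s.length s [] (le_refl _)

theorem pvStrReplace_eq (s old new : String) (hne : old.toList ≠ []) :
    PySem.Str.replace s old new = String.ofList (pvScanChars old.toList new.toList s.toList) := by
  unfold PySem.Str.replace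
  rw [pvReplace_eq_scan _ _ _ hne]

-- a phrase at the head of the text: the scanner emits the replacement and skips the phrase
theorem pvScanHead (P R m : List Char) (c : Char) (pt : List Char) (hP : P = c :: pt) :
    pvScanChars P R (P ++ m) = R ++ pvScanChars P R m := by
  subst hP
  show pvScanChars (c :: pt) R (c :: (pt ++ m)) = _
  have hp : (c :: pt).isPrefixOf (c :: (pt ++ m)) = true :=
    List.isPrefixOf_iff_prefix.mpr ⟨m, rfl⟩
  simp only [pvScanChars, hp, if_true]
  rw [show (c :: pt).length - 1 = pt.length from by simp, List.drop_left]

-- a prefix of (R ++ z) truncates to a prefix of R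
theorem pvTakePrefix (q R z : List Char) (h : q <+: R ++ z) : q.take R.length <+: R := by
  have := h.take R.length
  rwa [List.take_left] at this

-- no occurrence of P starts inside A: the one-pattern scanner passes A through unchanged
theorem pvCommuteClean (P R : List Char) :
    ∀ (A : List Char), (∀ k, k < A.length → ¬ (P.take (A.length - k) <+: A.drop k)) →
      ∀ x, pvScanChars P R (A ++ x) = A ++ pvScanChars P R x := by
  intro A
  induction A with
  | nil => intro _ x; simp
  | cons a A' ih =>
    intro h x
    have hnp : ¬ (P.isPrefixOf (a :: (A' ++ x)) = true) := by
      intro hb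
      have hpre : P <+: (a :: A') ++ x := List.isPrefixOf_iff_prefix.mp hb
      have := pvTakePrefix _ _ _ hpre
      exact h 0 (by simp) (by simpa using this)
    show pvScanChars P R (a :: (A' ++ x)) = a :: (A' ++ pvScanChars P R x)
    simp only [pvScanChars]
    rw [if_neg hnp]
    have h' : ∀ k, k < A'.length → ¬ (P.take (A'.length - k) <+: A'.drop k) := by
      intro k hk
      have := h (k + 1) (by simp; omega)
      simpa [Nat.succ_sub_succ] using this
    rw [ih h' x]

-- like pvCommuteClean, but position j of A only fails to match because x does not
-- continue with the rest of the pattern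
theorem pvCommuteCond (P R : List Char) :
    ∀ (A : List Char) (j : Nat), j < A.length →
      (∀ k, k < A.length → k ≠ j → ¬ (P.take (A.length - k) <+: A.drop k)) →
      P.take (A.length - j) = A.drop j →
      ∀ x, ¬ (P.drop (A.length - j) <+: x) →
      pvScanChars P R (A ++ x) = A ++ pvScanChars P R x := by
  intro A
  induction A with
  | nil => intro j hj; simp at hj
  | cons a A' ih =>
    intro j hj h heq x hx
    cases j with
    | zero =>
      have hnp : ¬ (P.isPrefixOf (a :: (A' ++ x)) = true) := by
        intro hb
        have hpre : P <+: (a :: A') ++ x := List.isPrefixOf_iff_prefix.mp hb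
        have heq' : P.take (a :: A').length = a :: A' := by simpa using heq
        have hdec : P = (a :: A') ++ P.drop (a :: A').length := by
          conv_lhs => rw [← List.take_append_drop (a :: A').length P]
          rw [heq']
        rw [hdec] at hpre
        have hxp : P.drop (a :: A').length <+: x := (List.prefix_append_right_inj _).mp hpre
        exact hx (by simpa using hxp)
      show pvScanChars P R (a :: (A' ++ x)) = a :: (A' ++ pvScanChars P R x)
      simp only [pvScanChars]
      rw [if_neg hnp]
      have h' : ∀ k, k < A'.length → ¬ (P.take (A'.length - k) <+: A'.drop k) := by
        intro k hk
        have := h (k + 1) (by simp; omega) (by omega)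
        simpa [Nat.succ_sub_succ] using this
      rw [pvCommuteClean P R A' h' x]
    | succ j' =>
      have hnp : ¬ (P.isPrefixOf (a :: (A' ++ x)) = true) := by
        intro hb
        have hpre : P <+: (a :: A') ++ x := List.isPrefixOf_iff_prefix.mp hb
        have := pvTakePrefix _ _ _ hpre
        exact h 0 (by simp) (by omega) (by simpa using this)
      show pvScanChars P R (a :: (A' ++ x)) = a :: (A' ++ pvScanChars P R x)
      simp only [pvScanChars]
      rw [if_neg hnp]
      have h' : ∀ k, k < A'.length → k ≠ j' → ¬ (P.take (A'.length - k) <+: A'.drop k) := by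
        intro k hk hkj
        have := h (k + 1) (by simp; omega) (by omega)
        simpa [Nat.succ_sub_succ] using this
      have heq' : P.take (A'.length - j') = A'.drop j' := by
        simpa [Nat.succ_sub_succ] using heq
      have hx' : ¬ (P.drop (A'.length - j') <+: x) := by
        simpa [Nat.succ_sub_succ] using hx
      rw [ih j' (by simpa using hj) h' heq' x hx']

-- no suffix of Q is compatible with the replacement R: a suffix of Q that prefixes the
-- scanner's output already prefixes its input
theorem pvCleanTransfer (P R Q : List Char)
    (h : ∀ k, k < Q.length → ¬ ((Q.drop k).take R.length <+: R)) :
    ∀ (n : Nat) (x : List Char), x.length ≤ n → ∀ k,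
      Q.drop k <+: pvScanChars P R x → Q.drop k <+: x := by
  intro n
  induction n with
  | zero =>
    intro x hx k hpre
    have hnil : x = [] := List.eq_nil_of_length_eq_zero (Nat.le_zero.mp hx)
    subst hnil
    simpa [pvScanChars] using hpre
  | succ n ih =>
    intro x hx k hpre
    cases x with
    | nil => simpa [pvScanChars] using hpre
    | cons c t =>
      rcases Nat.lt_or_ge k Q.length with hk | hk
      · by_cases hp : P.isPrefixOf (c :: t)
        · exfalso
          apply h k hk
          have hpre' : Q.drop k <+: R ++ pvScanChars P R (t.drop (P.length - 1)) := by
            simpa [pvScanChars, hp] using hpre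
          exact pvTakePrefix _ _ _ hpre'
        · have hpre' : Q.drop k <+: c :: pvScanChars P R t := by
            simpa [pvScanChars, hp] using hpre
          rw [List.drop_eq_getElem_cons hk] at hpre' ⊢
          rw [List.cons_prefix_cons] at hpre'
          obtain ⟨hc, htail⟩ := hpre'
          have ht : t.length ≤ n := by simp at hx; omega
          exact List.cons_prefix_cons.mpr ⟨hc, ih t ht (k + 1) htail⟩
      · have hqe : Q.drop k = [] := List.drop_eq_nil_of_le hk
        simp [hqe]

-- Q = W ++ R where R is the replacement: if a suffix of Q prefixes the scanner's output,
-- it either prefixed the input, or the input carried W's tail followed by a match of P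
theorem pvCreationTransfer (P R W : List Char) (hR : R ≠ [])
    (hmid : ∀ k, k < W.length → ¬ (((W ++ R).drop k).take R.length <+: R))
    (hclean : ∀ k, k < (R.drop 1).length → ¬ (((R.drop 1).drop k).take R.length <+: R)) :
    ∀ (n : Nat) (x : List Char), x.length ≤ n → ∀ k, k ≤ W.length →
      (W ++ R).drop k <+: pvScanChars P R x →
      ((W ++ R).drop k <+: x ∨ W.drop k ++ P <+: x) := by
  intro n
  induction n with
  | zero =>
    intro x hx k hkW hpre
    have hnil : x = [] := List.eq_nil_of_length_eq_zero (Nat.le_zero.mp hx)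
    subst hnil
    exfalso
    have hq : (W ++ R).drop k = [] := by simpa [pvScanChars] using hpre
    have hlen := congrArg List.length hq
    have hRlen : 1 ≤ R.length := by cases R with | nil => exact absurd rfl hR | cons _ _ => simp
    simp [List.length_append] at hlen
    omega
  | succ n ih =>
    intro x hx k hkW hpre
    cases x with
    | nil =>
      exfalso
      have hq : (W ++ R).drop k = [] := by simpa [pvScanChars] using hpre
      have hlen := congrArg List.length hq
      have hRlen : 1 ≤ R.length := by cases R with | nil => exact absurd rfl hR | cons _ _ => simp
      simp [List.length_append] at hlen
      omega
    | cons c t =>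
      by_cases hp : P.isPrefixOf (c :: t)
      · rcases Nat.lt_or_ge k W.length with hk | hk
        · exfalso
          apply hmid k hk
          have hpre' : (W ++ R).drop k <+: R ++ pvScanChars P R (t.drop (P.length - 1)) := by
            simpa [pvScanChars, hp] using hpre
          exact pvTakePrefix _ _ _ hpre'
        · have hkeq : k = W.length := le_antisymm hkW hk
          right
          rw [hkeq, List.drop_length]
          simpa using List.isPrefixOf_iff_prefix.mp hp
      · have hpre' : (W ++ R).drop k <+: c :: pvScanChars P R t := by
          simpa [pvScanChars, hp] using hpre
        have hRlen : 1 ≤ R.length := by cases R with | nil => exact absurd rfl hR | cons _ _ => simp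
        have hklt : k < (W ++ R).length := by simp [List.length_append]; omega
        rw [List.drop_eq_getElem_cons hklt] at hpre'
        rw [List.cons_prefix_cons] at hpre'
        obtain ⟨hc, htail⟩ := hpre'
        have ht : t.length ≤ n := by simp at hx; omega
        rcases Nat.lt_or_ge k W.length with hk | hk
        · rcases ih t ht (k + 1) (by omega) htail with hL | hRt
          · left
            rw [List.drop_eq_getElem_cons hklt]
            exact List.cons_prefix_cons.mpr ⟨hc, hL⟩
          · right
            rw [List.drop_eq_getElem_cons hk]
            have hWk : (W ++ R)[k]'hklt = W[k]'hk := List.getElem_append_left hk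
            show W[k] :: (W.drop (k + 1) ++ P) <+: c :: t
            exact List.cons_prefix_cons.mpr ⟨by rw [← hWk]; exact hc, hRt⟩
        · have hkeq : k = W.length := le_antisymm hkW hk
          subst hkeq
          have hdrop1 : (W ++ R).drop (W.length + 1) = R.drop 1 := by
            rw [List.drop_append]
            rw [List.drop_eq_nil_of_le (by omega)]
            simp
          rw [hdrop1] at htail
          have htR : R.drop 1 <+: t := by
            have := pvCleanTransfer P R (R.drop 1) hclean t.length t le_rfl 0 (by simpa using htail)
            simpa using this
          left
          rw [List.drop_left]
          cases R with
          | nil => exact absurd rfl hR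
          | cons rh rt =>
            have hklt' : W.length < (W ++ rh :: rt).length := by simp
            have hWk : (W ++ rh :: rt)[W.length]'hklt' = rh := by
              rw [List.getElem_append_right (le_refl W.length)]
              simp
            exact List.cons_prefix_cons.mpr ⟨by rw [← hWk]; exact hc, by simpa using htR⟩

-- specializations used in the main induction
theorem pvNoCreate1 (Q : List Char)
    (h : ∀ k, k < Q.length → ¬ ((Q.drop k).take pvR1.length <+: pvR1))
    (x : List Char) (hx : Q <+: pvScanChars pvP1 pvR1 x) : Q <+: x := by
  have := pvCleanTransfer pvP1 pvR1 Q h x.length x le_rfl 0 (by simpa using hx)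
  simpa using this

theorem pvCreate2 (W x : List Char)
    (hmid : ∀ k, k < W.length → ¬ (((W ++ pvR2).drop k).take pvR2.length <+: pvR2))
    (hx : (W ++ pvR2) <+: pvScanChars pvP2 pvR2 x) :
    (W ++ pvR2) <+: x ∨ W ++ pvP2 <+: x := by
  have := pvCreationTransfer pvP2 pvR2 W (by decide) hmid (by decide)
    x.length x le_rfl 0 (by simp) (by simpa using hx)
  exact this

theorem pvCreate3 (W x : List Char)
    (hmid : ∀ k, k < W.length → ¬ (((W ++ pvR2).drop k).take pvR2.length <+: pvR2))
    (hx : (W ++ pvR2) <+: pvScanChars pvP3 pvR2 x) :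
    (W ++ pvR2) <+: x ∨ W ++ pvP3 <+: x := by
  have := pvCreationTransfer pvP3 pvR2 W (by decide) hmid (by decide)
    x.length x le_rfl 0 (by simp) (by simpa using hx)
  exact this

theorem pvOnePass_nil : pvOnePass [] = [] := by rw [pvOnePass]

-- B's pass on a phrase at the head
theorem pvOnePass_match (p r : List Char) (c : Char) (pt m : List Char)
    (hp : p = c :: pt) (hd : pvDispatch c = some (p, r)) :
    pvOnePass (p ++ m) = r ++ pvOnePass m := by
  subst hp
  show pvOnePass (c :: (pt ++ m)) = r ++ pvOnePass m
  have hpre : (c :: pt).isPrefixOf (c :: (pt ++ m)) = true :=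
    List.isPrefixOf_iff_prefix.mpr ⟨m, rfl⟩
  simp only [pvOnePass]
  rw [hd]
  simp only [hpre, if_true]
  rw [show (c :: pt).length - 1 = pt.length from by simp, List.drop_left]

-- B's pass copies a character no phrase starts at
theorem pvOnePass_cons (c : Char) (t : List Char)
    (h : ∀ p r, pvDispatch c = some (p, r) → ¬ p <+: (c :: t)) :
    pvOnePass (c :: t) = c :: pvOnePass t := by
  simp only [pvOnePass]
  cases hd : pvDispatch c with
  | none => rfl
  | some pr =>
    obtain ⟨p, r⟩ := pr
    have hnp : ¬ (p.isPrefixOf (c :: t) = true) := fun hb =>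
      h p r hd (List.isPrefixOf_iff_prefix.mp hb)
    simp [hnp]

-- infix-avoidance closure
theorem pvAvoid_tail (l : List Char) (c : Char) (h : ∀ b ∈ pvBads, ¬ b <:+: (c :: l)) :
    ∀ b ∈ pvBads, ¬ b <:+: l :=
  fun b hb hi => h b hb (hi.trans (List.suffix_cons c l).isInfix)

theorem pvAvoid_drop (a m : List Char) (h : ∀ b ∈ pvBads, ¬ b <:+: (a ++ m)) :
    ∀ b ∈ pvBads, ¬ b <:+: m :=
  fun b hb hi => h b hb (hi.trans (List.suffix_append a m).isInfix)

-- the main simulation: on texts avoiding the six bad substrings, A's four sequential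
-- scans compose to B's single dispatch pass
theorem pvMain : ∀ (n : Nat) (l : List Char), l.length ≤ n → (∀ b ∈ pvBads, ¬ b <:+: l) →
    pvScanChars pvP4 pvR2 (pvScanChars pvP3 pvR2 (pvScanChars pvP2 pvR2 (pvScanChars pvP1 pvR1 l)))
      = pvOnePass l := by
  intro n
  induction n with
  | zero =>
    intro l hl _
    have : l = [] := List.eq_nil_of_length_eq_zero (Nat.le_zero.mp hl)
    subst this
    simp [pvScanChars, pvOnePass_nil]
  | succ n ih =>
    intro l hl hnb
    by_cases h1 : pvP1 <+: l
    · -- "normal users" at the head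
      obtain ⟨m, hm⟩ := h1
      subst hm
      have hnbm := pvAvoid_drop pvP1 m hnb
      have hTm : ¬ pvT <+: m := by
        intro hT
        obtain ⟨m2, hm2⟩ := hT
        apply hnb ("normal userstandard users".toList) (by simp [pvBads])
        exact List.IsPrefix.isInfix (⟨m2, by rw [show ("normal userstandard users".toList : List Char) = pvP1 ++ pvT from by decide]; rw [List.append_assoc, hm2]⟩ : ("normal userstandard users".toList : List Char) <+: pvP1 ++ m)
      have hT1 : ¬ pvT <+: pvScanChars pvP1 pvR1 m := fun h =>
        hTm (pvNoCreate1 pvT (by decide) m h)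
      rw [pvScanHead pvP1 pvR1 m 'n' ("ormal users".toList) (by decide)]
      rw [pvCommuteCond pvP2 pvR2 pvR1 15 (by decide) (by decide) (by decide) _
            (by rw [show pvP2.drop (pvR1.length - 15) = pvT from by decide]; exact hT1)]
      rw [pvCommuteClean pvP3 pvR2 pvR1 (by decide)]
      rw [pvCommuteClean pvP4 pvR2 pvR1 (by decide)]
      rw [pvOnePass_match pvP1 pvR1 'n' ("ormal users".toList) m (by decide) (by decide)]
      have hml : m.length ≤ n := by
        have h12 : pvP1.length = 12 := by decide
        rw [List.length_append, h12] at hl; omega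
      rw [ih m hml hnbm]
    · by_cases h2 : pvP2 <+: l
      · -- "standard users" at the head
        obtain ⟨m, hm⟩ := h2
        subst hm
        have hnbm := pvAvoid_drop pvP2 m hnb
        rw [pvCommuteClean pvP1 pvR1 pvP2 (by decide)]
        rw [pvScanHead pvP2 pvR2 _ 's' ("tandard users".toList) (by decide)]
        rw [pvCommuteClean pvP3 pvR2 pvR2 (by decide)]
        rw [pvCommuteClean pvP4 pvR2 pvR2 (by decide)]
        rw [pvOnePass_match pvP2 pvR2 's' ("tandard users".toList) m (by decide) (by decide)]
        have hml : m.length ≤ n := by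
          have h14 : pvP2.length = 14 := by decide
          rw [List.length_append, h14] at hl; omega
        rw [ih m hml hnbm]
      · by_cases h3 : pvP3 <+: l
        · -- "regular users" at the head
          obtain ⟨m, hm⟩ := h3
          subst hm
          have hnbm := pvAvoid_drop pvP3 m hnb
          have hTm : ¬ pvT <+: m := by
            intro hT
            obtain ⟨m2, hm2⟩ := hT
            apply hnb ("regular userstandard users".toList) (by simp [pvBads])
            exact List.IsPrefix.isInfix (⟨m2, by rw [show ("regular userstandard users".toList : List Char) = pvP3 ++ pvT from by decide]; rw [List.append_assoc, hm2]⟩ : ("regular userstandard users".toList : List Char) <+: pvP3 ++ m)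
          have hT1 : ¬ pvT <+: pvScanChars pvP1 pvR1 m := fun h =>
            hTm (pvNoCreate1 pvT (by decide) m h)
          rw [pvCommuteClean pvP1 pvR1 pvP3 (by decide)]
          rw [pvCommuteCond pvP2 pvR2 pvP3 12 (by decide) (by decide) (by decide) _
                (by rw [show pvP2.drop (pvP3.length - 12) = pvT from by decide]; exact hT1)]
          rw [pvScanHead pvP3 pvR2 _ 'r' ("egular users".toList) (by decide)]
          rw [pvCommuteClean pvP4 pvR2 pvR2 (by decide)]
          rw [pvOnePass_match pvP3 pvR2 'r' ("egular users".toList) m (by decide) (by decide)]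
          have hml : m.length ≤ n := by
            have h13 : pvP3.length = 13 := by decide
            rw [List.length_append, h13] at hl; omega
          rw [ih m hml hnbm]
        · by_cases h4 : pvP4 <+: l
          · -- "typical users" at the head
            obtain ⟨m, hm⟩ := h4
            subst hm
            have hnbm := pvAvoid_drop pvP4 m hnb
            have hTm : ¬ pvT <+: m := by
              intro hT
              obtain ⟨m2, hm2⟩ := hT
              apply hnb ("typical userstandard users".toList) (by simp [pvBads])
              exact List.IsPrefix.isInfix (⟨m2, by rw [show ("typical userstandard users".toList : List Char) = pvP4 ++ pvT from by decide]; rw [List.append_assoc, hm2]⟩ : ("typical userstandard users".toList : List Char) <+: pvP4 ++ m)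
            have hT1 : ¬ pvT <+: pvScanChars pvP1 pvR1 m := fun h =>
              hTm (pvNoCreate1 pvT (by decide) m h)
            rw [pvCommuteClean pvP1 pvR1 pvP4 (by decide)]
            rw [pvCommuteCond pvP2 pvR2 pvP4 12 (by decide) (by decide) (by decide) _
                  (by rw [show pvP2.drop (pvP4.length - 12) = pvT from by decide]; exact hT1)]
            rw [pvCommuteClean pvP3 pvR2 pvP4 (by decide)]
            rw [pvScanHead pvP4 pvR2 _ 't' ("ypical users".toList) (by decide)]
            rw [pvOnePass_match pvP4 pvR2 't' ("ypical users".toList) m (by decide) (by decide)]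
            have hml : m.length ≤ n := by
              have h13 : pvP4.length = 13 := by decide
              rw [List.length_append, h13] at hl; omega
            rw [ih m hml hnbm]
          · -- no phrase starts at the head
            cases hcl : l with
            | nil => subst hcl; simp [pvScanChars, pvOnePass_nil]
            | cons c t =>
            subst hcl
            have ht : t.length ≤ n := by simp at hl; omega
            have hnbt := pvAvoid_tail t c hnb
            -- step the four scanners over c one by one
            have hb1 : ¬ (pvP1.isPrefixOf (c :: t) = true) := fun hb =>
              h1 (List.isPrefixOf_iff_prefix.mp hb)
            have hs1 : pvScanChars pvP1 pvR1 (c :: t) = c :: pvScanChars pvP1 pvR1 t := by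
              conv_lhs => rw [pvScanChars]
              rw [if_neg hb1]
            have hq2 : ¬ pvP2 <+: pvScanChars pvP1 pvR1 (c :: t) := fun h =>
              h2 (pvNoCreate1 pvP2 (by decide) _ h)
            rw [hs1] at hq2
            have hs2 : pvScanChars pvP2 pvR2 (c :: pvScanChars pvP1 pvR1 t)
                = c :: pvScanChars pvP2 pvR2 (pvScanChars pvP1 pvR1 t) := by
              conv_lhs => rw [pvScanChars]
              rw [if_neg (fun hb => hq2 (List.isPrefixOf_iff_prefix.mp hb))]
            have hq3 : ¬ pvP3 <+: pvScanChars pvP2 pvR2 (pvScanChars pvP1 pvR1 (c :: t)) := by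
              intro h
              have h' : (pvW3 ++ pvR2) <+: pvScanChars pvP2 pvR2 (pvScanChars pvP1 pvR1 (c :: t)) := by
                rw [show pvW3 ++ pvR2 = pvP3 from by decide]; exact h
              rcases pvCreate2 pvW3 _ (by decide) h' with hL | hRt
              · rw [show pvW3 ++ pvR2 = pvP3 from by decide] at hL
                exact h3 (pvNoCreate1 pvP3 (by decide) _ hL)
              · have hB5 : ("regular standard users".toList : List Char) <+: (c :: t) := by
                  rw [show ("regular standard users".toList : List Char) = pvW3 ++ pvP2 from by decide]
                  exact pvNoCreate1 (pvW3 ++ pvP2) (by decide) _ hRt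
                exact hnb _ (by simp [pvBads]) (List.IsPrefix.isInfix hB5)
            have hq4 : ¬ pvP4 <+: pvScanChars pvP3 pvR2 (pvScanChars pvP2 pvR2 (pvScanChars pvP1 pvR1 (c :: t))) := by
              intro h
              have h' : (pvW4 ++ pvR2) <+: pvScanChars pvP3 pvR2 (pvScanChars pvP2 pvR2 (pvScanChars pvP1 pvR1 (c :: t))) := by
                rw [show pvW4 ++ pvR2 = pvP4 from by decide]; exact h
              rcases pvCreate3 pvW4 _ (by decide) h' with h4a | h4b
              · -- "typical users" already prefixed rep2 (rep1 l)
                rcases pvCreate2 pvW4 _ (by decide) h4a with h4c | h4d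
                · rw [show pvW4 ++ pvR2 = pvP4 from by decide] at h4c
                  exact h4 (pvNoCreate1 pvP4 (by decide) _ h4c)
                · have hB6 : ("typical standard users".toList : List Char) <+: (c :: t) := by
                    rw [show ("typical standard users".toList : List Char) = pvW4 ++ pvP2 from by decide]
                    exact pvNoCreate1 (pvW4 ++ pvP2) (by decide) _ h4d
                  exact hnb _ (by simp [pvBads]) (List.IsPrefix.isInfix hB6)
              · -- "typical regular users" prefixed rep2 (rep1 l)
                have h4b' : (pvW43 ++ pvR2) <+: pvScanChars pvP2 pvR2 (pvScanChars pvP1 pvR1 (c :: t)) := by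
                  rw [show pvW43 ++ pvR2 = pvW4 ++ pvP3 from by decide]; exact h4b
                rcases pvCreate2 pvW43 _ (by decide) h4b' with h4e | h4f
                · have hB7 : ("typical regular users".toList : List Char) <+: (c :: t) := by
                    rw [show ("typical regular users".toList : List Char) = pvW43 ++ pvR2 from by decide]
                    exact pvNoCreate1 (pvW43 ++ pvR2) (by decide) _ h4e
                  exact hnb _ (by simp [pvBads]) (List.IsPrefix.isInfix hB7)
                · have hTRS : ("typical regular standard users".toList : List Char) <+: (c :: t) := by
                    rw [show ("typical regular standard users".toList : List Char) = pvW43 ++ pvP2 from by decide]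
                    exact pvNoCreate1 (pvW43 ++ pvP2) (by decide) _ h4f
                  exact hnb ("regular standard users".toList) (by simp [pvBads])
                    ((show ("regular standard users".toList : List Char) <:+: ("typical regular standard users".toList : List Char) from by decide).trans (List.IsPrefix.isInfix hTRS))
            -- rewrite the composition and B's pass
            rw [hs1, hs2]
            rw [hs1, hs2] at hq3
            have hs3 : pvScanChars pvP3 pvR2 (c :: pvScanChars pvP2 pvR2 (pvScanChars pvP1 pvR1 t))
                = c :: pvScanChars pvP3 pvR2 (pvScanChars pvP2 pvR2 (pvScanChars pvP1 pvR1 t)) := by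
              conv_lhs => rw [pvScanChars]
              rw [if_neg (fun hb => hq3 (List.isPrefixOf_iff_prefix.mp hb))]
            rw [hs3]
            rw [hs1, hs2, hs3] at hq4
            have hs4 : pvScanChars pvP4 pvR2 (c :: pvScanChars pvP3 pvR2 (pvScanChars pvP2 pvR2 (pvScanChars pvP1 pvR1 t)))
                = c :: pvScanChars pvP4 pvR2 (pvScanChars pvP3 pvR2 (pvScanChars pvP2 pvR2 (pvScanChars pvP1 pvR1 t))) := by
              conv_lhs => rw [pvScanChars]
              rw [if_neg (fun hb => hq4 (List.isPrefixOf_iff_prefix.mp hb))]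
            rw [hs4]
            rw [pvOnePass_cons c t (by
              intro p r hd
              unfold pvDispatch at hd
              split_ifs at hd with hc1 hc2 hc3 hc4
              · simp only [Option.some.injEq, Prod.mk.injEq] at hd
                obtain ⟨hp', _⟩ := hd; subst hp'; exact h1
              · simp only [Option.some.injEq, Prod.mk.injEq] at hd
                obtain ⟨hp', _⟩ := hd; subst hp'; exact h2
              · simp only [Option.some.injEq, Prod.mk.injEq] at hd
                obtain ⟨hp', _⟩ := hd; subst hp'; exact h3
              · simp only [Option.some.injEq, Prod.mk.injEq] at hd
                obtain ⟨hp', _⟩ := hd; subst hp'; exact h4)]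
            rw [ih t ht hnbt]

-- ===== VERDICT (by name: the statement is the Claim_ definition above) =====
theorem apply_moderate_mitigation_py_spec : Claim_equal_apply_moderate_mitigation_py := by
  intro text _ hpre
  unfold Spec_apply_moderate_mitigation_py apply_moderate_mitigation_py apply_moderate_mitigation_py_alt
  have hitems :
      (((((PySem.Dict.empty.insert "normal users" "authorized users").insert
            "standard users" "users").insert
            "regular users" "users").insert
            "typical users" "users" : PySem.Dict String String)).items =
        [("normal users", "authorized users"), ("standard users", "users"),
         ("regular users", "users"), ("typical users", "users")] := by decide
  simp only [hitems, List.foldl]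
  rw [pvStrReplace_eq _ _ _ (by decide), pvStrReplace_eq _ _ _ (by decide),
      pvStrReplace_eq _ _ _ (by decide), pvStrReplace_eq _ _ _ (by decide)]
  simp only [String.toList_ofList]
  exact congrArg String.ofList
    (pvMain text.toList.length text.toList le_rfl hpre)
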